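-- pv_equiv track=rewrite | github.com/taokz/EditGRPO | verl/utils/RaTEscore_extractor.py | clean_eos_tokens
-- ===== SOURCE A (Python) =====
-- def clean_eos_tokens(text: str) -> str:
--     """Remove all variations of EOS tokens from text."""
--     if not text:
--         return text
--
--     # Common EOS token variations - order matters!
--     # First handle tokens with surrounding spaces/newlines
--     eos_patterns_with_space = [
--         " <|endoftext|> ", " <|end_of_text|> ", " </s> ", " <eos> ",
--         " <|eot_id|> ", " [EOS] ", " [END] ", " <|im_end|> ",
--         "\n<|endoftext|>\n", "\n<|end_of_text|>\n", "\n</s>\n", "\n<eos>\n",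
--         "\n<|endoftext|> ", " <|endoftext|>\n", "\n</s> ", " </s>\n",
--     ]
--
--     # Then handle tokens without spaces (replace with a space to maintain separation)
--     eos_patterns_no_space = [
--         "<|endoftext|>", "<|end_of_text|>", "</s>", "<eos>",
--         "<|eot_id|>", "[EOS]", "[END]", "<|im_end|>",
--     ]
--
--     cleaned_text = text
--
--     # First pass: replace patterns that already have spaces
--     for pattern in eos_patterns_with_space:
--         cleaned_text = cleaned_text.replace(pattern, " ")
--
--     # Second pass: replace bare tokens with a space to maintain word separation
--     for pattern in eos_patterns_no_space:
--         cleaned_text = cleaned_text.replace(pattern, " ")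
--
--     # Clean up any resulting multiple spaces
--     cleaned_text = ' '.join(cleaned_text.split())
--
--     return cleaned_text.strip()
-- ===== SOURCE B (Python) =====
-- # Single left-to-right scan over the text replacing any of the 8 bare EOS tokens
-- # by a space (the whitespace-padded variants collapse in the final split/join),
-- # then one whitespace normalization. One pass instead of 24 sequential .replace scans.
--
-- EOS_TOKENS = (
--     "<|endoftext|>", "<|end_of_text|>", "</s>", "<eos>",
--     "<|eot_id|>", "[EOS]", "[END]", "<|im_end|>",
-- )
--
--
-- def clean_eos_tokens(text: str) -> str:
--     """Remove all variations of EOS tokens from text."""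
--     if not text:
--         return text
--     out = []
--     i = 0
--     n = len(text)
--     while i < n:
--         for tok in EOS_TOKENS:
--             if text.startswith(tok, i):
--                 out.append(' ')
--                 i += len(tok)
--                 break
--         else:
--             out.append(text[i])
--             i += 1
--     return ' '.join(''.join(out).split())
-- ===== Notes on version B (the rewrite author's own statement) =====
-- stated objective: alternative
-- what changed: Replaced A's 24 sequential whole-string .replace passes (16 space-padded variants then 8 bare tokens) by a single left-to-right scan that matches the 8 bare tokens once and emits a space, relying on the final whitespace normalization to absorb the padded variants; the proof shows the tokens are pairwise non-overlapping so one pass finds the same occurrences.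
import Mathlib
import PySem

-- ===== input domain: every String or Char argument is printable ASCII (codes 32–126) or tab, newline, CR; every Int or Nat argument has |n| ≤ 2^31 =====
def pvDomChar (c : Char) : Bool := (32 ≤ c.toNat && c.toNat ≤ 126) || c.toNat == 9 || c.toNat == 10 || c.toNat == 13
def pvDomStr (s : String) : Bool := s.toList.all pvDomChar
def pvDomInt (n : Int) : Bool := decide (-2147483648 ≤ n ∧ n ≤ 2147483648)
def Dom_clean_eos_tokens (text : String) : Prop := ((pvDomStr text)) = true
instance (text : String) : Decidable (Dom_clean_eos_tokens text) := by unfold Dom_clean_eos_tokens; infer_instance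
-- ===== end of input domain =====

-- B replaces A's 24 sequential whole-string .replace passes by one left-to-right scan over
-- the 8 bare EOS tokens followed by the same whitespace normalization (objective: alternative).

-- ===== PORT A =====
def pvPats16 : List String :=
  [" <|endoftext|> ", " <|end_of_text|> ", " </s> ", " <eos> ",
   " <|eot_id|> ", " [EOS] ", " [END] ", " <|im_end|> ",
   "\n<|endoftext|>\n", "\n<|end_of_text|>\n", "\n</s>\n", "\n<eos>\n",
   "\n<|endoftext|> ", " <|endoftext|>\n", "\n</s> ", " </s>\n"]

def pvPats8 : List String :=
  ["<|endoftext|>", "<|end_of_text|>", "</s>", "<eos>",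
   "<|eot_id|>", "[EOS]", "[END]", "<|im_end|>"]

def clean_eos_tokens (text : String) : String :=
  if text = "" then text
  else
    let c1 := pvPats16.foldl (fun s p => PySem.Str.replace s p " ") text
    let c2 := pvPats8.foldl (fun s p => PySem.Str.replace s p " ") c1
    PySem.Str.strip (PySem.Str.join " " (PySem.Str.split₀ c2))

-- ===== PORT B =====
-- the 8 bare EOS tokens, as char lists, in Source B's EOS_TOKENS order
def pvTokens : List (List Char) :=
  [['<','|','e','n','d','o','f','t','e','x','t','|','>'],
   ['<','|','e','n','d','_','o','f','_','t','e','x','t','|','>'],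
   ['<','/','s','>'],
   ['<','e','o','s','>'],
   ['<','|','e','o','t','_','i','d','|','>'],
   ['[','E','O','S',']'],
   ['[','E','N','D',']'],
   ['<','|','i','m','_','e','n','d','|','>']]

-- Source B's inner `for tok in EOS_TOKENS: if text.startswith(tok, i)` loop
def pvFindTok (l : List Char) : Option Nat :=
  (pvTokens.find? (fun u => u.isPrefixOf l)).map List.length

-- Source B's `while i < n` scan, the position i carried as the remaining suffix (fuel = length)
def pvScanGo : Nat → List Char → List Char
  | 0, _ => []
  | _ + 1, [] => []
  | fuel + 1, c :: t =>
    match pvFindTok (c :: t) with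
    | some k => ' ' :: pvScanGo fuel ((c :: t).drop k)
    | none => c :: pvScanGo fuel t

def clean_eos_tokens_alt (text : String) : String :=
  if text = "" then text
  else
    let cleaned := String.ofList (pvScanGo text.toList.length text.toList)
    PySem.Str.join " " (PySem.Str.split₀ cleaned)

-- ===== PRECONDITION & SPEC =====
def Spec_clean_eos_tokens (text : String) (out : String) : Prop := out = clean_eos_tokens_alt text
instance (text : String) (out : String) : Decidable (Spec_clean_eos_tokens text out) := by unfold Spec_clean_eos_tokens; infer_instance

-- ===== CLAIM (what is proved, stated in full; the proofs are below) =====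
def Claim_equal_clean_eos_tokens : Prop := ∀ (text : String), Dom_clean_eos_tokens text → Spec_clean_eos_tokens text (clean_eos_tokens text)

-- ===== LEMMAS AND PROOFS =====

-- shorthand used by the proofs
def pvWS (c : Char) : Bool := PySem.Chars.isspace c
def pvNS (c : Char) : Bool := !PySem.Chars.isspace c

-- clean fuel version of PySem.Chars.replace.go with replacement [' ']
def pvRepGo (p : List Char) : Nat → List Char → List Char
  | 0, l => l
  | _ + 1, [] => []
  | fuel + 1, c :: t =>
    if p.isPrefixOf (c :: t) then ' ' :: pvRepGo p fuel ((c :: t).drop p.length)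
    else c :: pvRepGo p fuel t

def pvR (p l : List Char) : List Char := pvRepGo p l.length l
def pvScan (l : List Char) : List Char := pvScanGo l.length l

-- collapse each maximal whitespace run to a single space
def pvCol : List Char → List Char
  | [] => []
  | c :: t =>
    if pvWS c then ' ' :: pvCol (t.dropWhile pvWS) else c :: pvCol t
  termination_by l => l.length
  decreasing_by
    · simpa using Nat.lt_succ_of_le (List.length_dropWhile_le ..)
    · simp

-- whitespace-separated words
def pvWords : List Char → List (List Char)
  | [] => []
  | c :: t =>
    if pvWS c then pvWords t
    else (c :: t.takeWhile pvNS) :: pvWords (t.dropWhile pvNS)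
  termination_by l => l.length
  decreasing_by
    · simp
    · simpa using Nat.lt_succ_of_le (List.length_dropWhile_le ..)

-- split₀.go reference: words with a current (in-order) partial word
def pvWordsC (cur : List Char) : List Char → List (List Char)
  | [] => if cur = [] then [] else [cur]
  | c :: rest =>
    if pvWS c then (if cur = [] then pvWordsC [] rest else cur :: pvWordsC [] rest)
    else pvWordsC (cur ++ [c]) rest

def pvNotIn (w l : List Char) : Prop := ∀ i : Nat, ¬ w <+: l.drop i

-- ---- concrete token facts (decide) ----
lemma tok_ne_nil : ∀ u ∈ pvTokens, u ≠ [] := by decide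
lemma tok_nows_b : (pvTokens.all (fun u => u.all (fun c => !PySem.Chars.isspace c))) = true := by decide

lemma tok_nows : ∀ u ∈ pvTokens, ∀ c ∈ u, PySem.Chars.isspace c = false := by
  intro u hu c hc
  have h := tok_nows_b
  simp only [List.all_eq_true, Bool.not_eq_true'] at h
  exact h u hu c hc
lemma tok_nopref : ∀ u ∈ pvTokens, ∀ w ∈ pvTokens, u ≠ w → ¬ u <+: w := by decide
set_option maxRecDepth 100000 in
lemma tok_ovlp_b : (pvTokens.all (fun u => pvTokens.all (fun p =>
    (List.range' 1 (u.length - 1)).all (fun i =>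
      !(p.isPrefixOf (u.drop i)) && !((u.drop i).isPrefixOf p))))) = true := by decide

lemma tok_ovlp : ∀ u ∈ pvTokens, ∀ p ∈ pvTokens, ∀ i < u.length, 0 < i →
    ¬ p <+: u.drop i ∧ ¬ u.drop i <+: p := by
  intro u hu p hp i hiu hi
  have h := tok_ovlp_b
  simp only [List.all_eq_true] at h
  have hne : u ≠ [] := tok_ne_nil u hu
  have hmem : i ∈ List.range' 1 (u.length - 1) := by
    rw [List.mem_range'_1]
    have : 0 < u.length := List.length_pos_iff.mpr hne
    omega
  have := h u hu p hp i hmem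
  simp only [Bool.and_eq_true, Bool.not_eq_true'] at this
  constructor
  · intro hc; have := this.1; rw [← List.isPrefixOf_iff_prefix] at hc; simp [hc] at this
  · intro hc; have := this.2; rw [← List.isPrefixOf_iff_prefix] at hc; simp [hc] at this
-- ---- generic prefix helpers ----
lemma prefix_trunc {w A X : List Char} (h : w <+: A ++ X) (hlen : w.length ≤ A.length) :
    w <+: A := by
  rw [List.prefix_iff_eq_take] at h ⊢
  rw [h, List.take_append_of_le_length hlen]
  simp [List.length_take]

lemma prefix_char {w A X : List Char} {b : Char} (h : w <+: A ++ b :: X)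
    (hlen : A.length < w.length) : w[A.length]? = some b := by
  obtain ⟨r, hr⟩ := h
  have h1 : (w ++ r)[A.length]? = w[A.length]? := List.getElem?_append_left hlen
  have h2 : (A ++ b :: X)[A.length]? = some b := by
    rw [List.getElem?_append_right (le_refl _)]
    simp
  rw [hr] at h1
  rw [← h1, h2]

lemma prefix_split {a A B : List Char} (h : a <+: A ++ B) : a <+: A ∨ A <+: a :=
  List.prefix_or_prefix_of_prefix h (List.prefix_append A B)

-- ---- rep lemmas ----
lemma pvRepGo_go (p : List Char) (hp : p ≠ []) :
    ∀ (fuel : Nat) (l acc : List Char),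
      PySem.Chars.replace.go p [' '] fuel l acc = acc.reverse ++ pvRepGo p fuel l := by
  intro fuel
  induction fuel with
  | zero => intro l acc; rw [PySem.Chars.replace.go]; rfl
  | succ f ih =>
    intro l acc
    cases l with
    | nil => rw [PySem.Chars.replace.go]; simp [pvRepGo]; omega
    | cons c t =>
      rw [PySem.Chars.replace.go]
      by_cases hpre : p.isPrefixOf (c :: t)
      · simp only [hpre, if_true, pvRepGo, ih]
        simp
      · simp only [hpre, if_false, pvRepGo, ih, Bool.false_eq_true]
        simp

lemma pvReplace_eq (p l : List Char) (hp : p ≠ []) :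
    PySem.Chars.replace l p [' '] = pvR p l := by
  rw [PySem.Chars.replace]
  have : p.isEmpty = false := by simpa [List.isEmpty_iff] using hp
  rw [this]
  simp only [Bool.false_eq_true, if_false]
  rw [pvRepGo_go p hp]
  rfl

lemma pvRepGo_of_le (p : List Char) (hp : p ≠ []) :
    ∀ (f : Nat), ∀ (l : List Char) (f' : Nat), l.length ≤ f → l.length ≤ f' →
      pvRepGo p f l = pvRepGo p f' l := by
  have hp1 : 0 < p.length := List.length_pos_iff.mpr hp
  intro f
  induction f with
  | zero =>
    intro l f' h1 _
    have : l = [] := List.eq_nil_of_length_eq_zero (by omega)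
    subst this
    cases f' <;> rfl
  | succ f ih =>
    intro l f' h1 h2
    cases l with
    | nil => cases f' <;> rfl
    | cons c t =>
      simp only [List.length_cons] at h1 h2
      cases f' with
      | zero => omega
      | succ f'' =>
        simp only [pvRepGo]
        by_cases hpre : p.isPrefixOf (c :: t)
        · simp only [hpre, if_true]
          congr 1
          apply ih
          · simp [List.length_drop]; omega
          · simp [List.length_drop]; omega
        · simp only [hpre, Bool.false_eq_true, if_false]
          congr 1
          apply ih <;> omega

lemma pvR_cons_pos {p : List Char} (hp : p ≠ []) {c : Char} {t : List Char}
    (h : p <+: c :: t) : pvR p (c :: t) = ' ' :: pvR p ((c :: t).drop p.length) := by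
  have hp1 : 0 < p.length := List.length_pos_iff.mpr hp
  have hpre : p.isPrefixOf (c :: t) = true := List.isPrefixOf_iff_prefix.mpr h
  show pvRepGo p (t.length + 1) (c :: t) = _
  simp only [pvRepGo, hpre, if_true]
  congr 1
  apply pvRepGo_of_le p hp
  · simp [List.length_drop]; omega
  · rfl

lemma pvR_cons_neg {p : List Char} {c : Char} {t : List Char}
    (h : ¬ p <+: c :: t) : pvR p (c :: t) = c :: pvR p t := by
  have hpre : p.isPrefixOf (c :: t) = false := by
    rw [← Bool.not_eq_true, List.isPrefixOf_iff_prefix]; exact h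
  show pvRepGo p (t.length + 1) (c :: t) = _
  simp only [pvRepGo, hpre, Bool.false_eq_true, if_false]
  rfl

lemma pvR_copy (p : List Char) (hp : p ≠ []) :
    ∀ (v m : List Char), (∀ i < v.length, ¬ p <+: v.drop i ++ m) →
      pvR p (v ++ m) = v ++ pvR p m := by
  intro v
  induction v with
  | nil => intro m _; rfl
  | cons c vt ih =>
    intro m h
    have h0 : ¬ p <+: c :: (vt ++ m) := by
      have := h 0 (by simp)
      simpa using this
    show pvR p (c :: (vt ++ m)) = _
    rw [pvR_cons_neg h0, ih m (fun i hi => by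
      have := h (i + 1) (by simp; omega)
      simpa using this)]
    rfl

lemma pvR_decomp (p : List Char) (hp : p ≠ []) (l : List Char) :
    ((∀ i : Nat, ¬ p <+: l.drop i) ∧ pvR p l = l) ∨
    (∃ j : Nat, j < l.length ∧ (∀ i < j, ¬ p <+: l.drop i) ∧ p <+: l.drop j ∧
      pvR p l = l.take j ++ ' ' :: pvR p (l.drop (j + p.length))) := by
  induction l with
  | nil =>
    left
    constructor
    · intro i
      simp only [List.drop_nil, List.prefix_nil]
      exact hp
    · rfl
  | cons c t ih =>
    by_cases hpre : p <+: c :: t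
    · right
      exact ⟨0, by simp, fun i hi => absurd hi (by omega), by simpa using hpre,
        by rw [pvR_cons_pos hp hpre]; simp⟩
    · rcases ih with ⟨hall, heq⟩ | ⟨j, hj, hmin, hocc, heq⟩
      · left
        refine ⟨fun i => ?_, by rw [pvR_cons_neg hpre, heq]⟩
        cases i with
        | zero => simpa using hpre
        | succ i => simpa using hall i
      · right
        refine ⟨j + 1, by simp; omega, fun i hi => ?_, by simpa using hocc, ?_⟩
        · cases i with
          | zero => simpa using hpre
          | succ i => simpa using hmin i (by omega)
        · rw [pvR_cons_neg hpre, heq]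
          have harith : j + 1 + p.length = (j + p.length) + 1 := by omega
          simp [harith]

lemma pvR_head {p w : List Char} (hp : p ≠ []) (hwne : w ≠ [])
    (hwns : ∀ c ∈ w, PySem.Chars.isspace c = false) {l : List Char}
    (h : ¬ w <+: l) : ¬ w <+: pvR p l := by
  rcases pvR_decomp p hp l with ⟨_, heq⟩ | ⟨j, hj, hmin, hocc, heq⟩
  · rw [heq]; exact h
  · rw [heq]
    intro hc
    have hA : (l.take j).length = j := by simp [List.length_take]; omega
    rcases (by omega : w.length ≤ j ∨ j < w.length) with hle | hlt
    · have hw : w <+: l.take j := prefix_trunc hc (by omega)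
      exact h (hw.trans (List.take_prefix j l))
    · have hb := prefix_char hc (by omega)
      rw [hA] at hb
      have hmem : ' ' ∈ w := List.mem_of_getElem? hb
      have := hwns ' ' hmem
      rw [show PySem.Chars.isspace ' ' = true from by decide] at this
      exact absurd this (by simp)

lemma pvR_notIn {p w : List Char} (hp : p ≠ []) (hwne : w ≠ [])
    (hwns : ∀ c ∈ w, PySem.Chars.isspace c = false) :
    ∀ (n : Nat) (l : List Char), l.length ≤ n → (w = p ∨ pvNotIn w l) →
      pvNotIn w (pvR p l) := by
  have hp1 : 0 < p.length := List.length_pos_iff.mpr hp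
  intro n
  induction n with
  | zero =>
    intro l hl _
    have : l = [] := List.eq_nil_of_length_eq_zero (by omega)
    subst this
    intro i
    show ¬ w <+: (pvR p []).drop i
    have : pvR p [] = [] := rfl
    rw [this]
    simp only [List.drop_nil, List.prefix_nil]
    exact hwne
  | succ n ih =>
    intro l hl hyp
    rcases pvR_decomp p hp l with ⟨hall, heq⟩ | ⟨j, hj, hmin, hocc, heq⟩
    · rw [heq]
      rcases hyp with rfl | hni
      · exact hall
      · exact hni
    · rw [heq]
      intro i hc
      have hA : (l.take j).length = j := by simp [List.length_take]; omega
      rcases (by omega : i ≤ j ∨ j < i) with hij | hij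
      · rw [List.drop_append_of_le_length (by omega)] at hc
        have hAi : ((l.take j).drop i).length = j - i := by simp [List.length_drop, hA]
        rcases (by omega : w.length ≤ j - i ∨ j - i < w.length) with hle | hlt
        · have hw : w <+: (l.take j).drop i := prefix_trunc hc (by omega)
          rw [List.drop_take] at hw
          have hw2 : w <+: l.drop i := hw.trans (List.take_prefix _ _)
          have hlen0 : 0 < w.length := List.length_pos_iff.mpr hwne
          have hij' : i < j := by omega
          rcases hyp with rfl | hni
          · exact hmin i hij' hw2
          · exact hni i hw2
        · have hb := prefix_char hc (by omega)
          rw [hAi] at hb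
          have hmem : ' ' ∈ w := List.mem_of_getElem? hb
          have := hwns ' ' hmem
          rw [show PySem.Chars.isspace ' ' = true from by decide] at this
          exact absurd this (by simp)
      · rw [List.drop_append] at hc
        rw [List.drop_eq_nil_of_le (by omega), hA] at hc
        have hij1 : 1 ≤ i - j := by omega
        rw [List.nil_append] at hc
        have hdrop : (' ' :: pvR p (l.drop (j + p.length))).drop (i - j)
            = (pvR p (l.drop (j + p.length))).drop (i - j - 1) := by
          cases hij : i - j with
          | zero => omega
          | succ k => simp
        rw [hdrop] at hc
        have hm : (l.drop (j + p.length)).length ≤ n := by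
          simp only [List.length_drop]
          omega
        have hyp' : w = p ∨ pvNotIn w (l.drop (j + p.length)) := by
          rcases hyp with rfl | hni
          · exact Or.inl rfl
          · refine Or.inr fun i' => ?_
            rw [List.drop_drop]
            exact hni _
        exact ih (l.drop (j + p.length)) hm hyp' (i - j - 1) hc

-- ---- findTok / scan lemmas ----
lemma pvFindTok_some_spec {l : List Char} {k : Nat} (h : pvFindTok l = some k) :
    ∃ u, u ∈ pvTokens ∧ u <+: l ∧ k = u.length := by
  unfold pvFindTok at h
  rcases hf : pvTokens.find? (fun u => u.isPrefixOf l) with _ | u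
  · rw [hf] at h; simp at h
  · rw [hf] at h
    simp only [Option.map_some, Option.some.injEq] at h
    have hmem := List.mem_of_find?_eq_some hf
    have hpre := List.find?_some hf
    exact ⟨u, hmem, List.isPrefixOf_iff_prefix.mp hpre, h.symm⟩

lemma pvFindTok_none_iff {l : List Char} :
    pvFindTok l = none ↔ ∀ u ∈ pvTokens, ¬ u <+: l := by
  unfold pvFindTok
  rw [Option.map_eq_none_iff, List.find?_eq_none]
  constructor
  · intro h u hu hc
    exact absurd (List.isPrefixOf_iff_prefix.mpr hc) (by simpa using h u hu)
  · intro h u hu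
    simpa using fun hc => h u hu (List.isPrefixOf_iff_prefix.mp hc)

lemma tok_unique {u w l : List Char} (hu : u ∈ pvTokens) (hw : w ∈ pvTokens)
    (h1 : u <+: l) (h2 : w <+: l) : w = u := by
  by_contra hne
  rcases List.prefix_or_prefix_of_prefix h2 h1 with hc | hc
  · exact tok_nopref w hw u hu hne hc
  · exact tok_nopref u hu w hw (fun h => hne h.symm) hc

lemma pvFindTok_eq_some {u l : List Char} (hu : u ∈ pvTokens) (h : u <+: l) :
    pvFindTok l = some u.length := by
  unfold pvFindTok
  rcases hf : pvTokens.find? (fun v => v.isPrefixOf l) with _ | v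
  · rw [List.find?_eq_none] at hf
    exact absurd (List.isPrefixOf_iff_prefix.mpr h) (by simpa using hf u hu)
  · have hmem := List.mem_of_find?_eq_some hf
    have hpre0 := List.find?_some hf
    have hpre := List.isPrefixOf_iff_prefix.mp hpre0
    rw [hf, Option.map_some, tok_unique hu hmem h hpre]

lemma pvFindTok_ws_head {c : Char} {t : List Char} (hc : PySem.Chars.isspace c = true) :
    pvFindTok (c :: t) = none := by
  rw [pvFindTok_none_iff]
  intro u hu hpre
  have hune := tok_ne_nil u hu
  cases u with
  | nil => exact hune rfl
  | cons d u' =>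
    obtain ⟨r, hr⟩ := hpre
    have hd : d = c := by injection hr
    have := tok_nows _ hu d (by simp)
    rw [hd] at this
    rw [hc] at this
    exact absurd this (by simp)

lemma pvScanGo_of_le :
    ∀ (f : Nat), ∀ (l : List Char) (f' : Nat), l.length ≤ f → l.length ≤ f' →
      pvScanGo f l = pvScanGo f' l := by
  intro f
  induction f with
  | zero =>
    intro l f' h1 _
    have : l = [] := List.eq_nil_of_length_eq_zero (by omega)
    subst this
    cases f' <;> rfl
  | succ f ih =>
    intro l f' h1 h2
    cases l with
    | nil => cases f' <;> rfl
    | cons c t =>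
      simp only [List.length_cons] at h1 h2
      cases f' with
      | zero => omega
      | succ f'' =>
        simp only [pvScanGo]
        rcases hf : pvFindTok (c :: t) with _ | k
        · simp only []
          congr 1
          apply ih <;> omega
        · obtain ⟨u, hu, _, hk⟩ := pvFindTok_some_spec hf
          have hk1 : 0 < k := by
            rw [hk]
            exact List.length_pos_iff.mpr (tok_ne_nil u hu)
          simp only []
          congr 1
          apply ih
          · simp [List.length_drop]; omega
          · simp [List.length_drop]; omega

lemma pvScan_cons_some {c : Char} {t : List Char} {k : Nat}
    (h : pvFindTok (c :: t) = some k) :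
    pvScan (c :: t) = ' ' :: pvScan ((c :: t).drop k) := by
  obtain ⟨u, hu, _, hk⟩ := pvFindTok_some_spec h
  have hk1 : 0 < k := by
    rw [hk]; exact List.length_pos_iff.mpr (tok_ne_nil u hu)
  show pvScanGo (t.length + 1) (c :: t) = _
  simp only [pvScanGo, h]
  congr 1
  apply pvScanGo_of_le
  · simp [List.length_drop]; omega
  · rfl

lemma pvScan_cons_none {c : Char} {t : List Char}
    (h : pvFindTok (c :: t) = none) : pvScan (c :: t) = c :: pvScan t := by
  show pvScanGo (t.length + 1) (c :: t) = _
  simp only [pvScanGo, h]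
  rfl

lemma pvScan_tokFree :
    ∀ (n : Nat) (l : List Char), l.length ≤ n → (∀ w ∈ pvTokens, pvNotIn w l) →
      pvScan l = l := by
  intro n
  induction n with
  | zero =>
    intro l hl _
    have : l = [] := List.eq_nil_of_length_eq_zero (by omega)
    subst this; rfl
  | succ n ih =>
    intro l hl hfree
    cases l with
    | nil => rfl
    | cons c t =>
      have hnone : pvFindTok (c :: t) = none := by
        rw [pvFindTok_none_iff]
        intro u hu hc
        exact hfree u hu 0 (by simpa using hc)
      rw [pvScan_cons_none hnone]
      congr 1
      apply ih t (by simpa using Nat.le_of_succ_le_succ (by simpa using hl))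
      intro w hw i
      have := hfree w hw (i + 1)
      simpa using this

-- ---- MAIN2: bare tokens commute with scan exactly ----
lemma scan_R_tok :
    ∀ (n : Nat) (l : List Char), l.length ≤ n → ∀ p ∈ pvTokens,
      pvScan (pvR p l) = pvScan l := by
  intro n
  induction n with
  | zero =>
    intro l hl p _
    have : l = [] := List.eq_nil_of_length_eq_zero (by omega)
    subst this; rfl
  | succ n ih =>
    intro l hl p hp
    have hpne : p ≠ [] := tok_ne_nil p hp
    have hp1 : 0 < p.length := List.length_pos_iff.mpr hpne
    cases l with
    | nil => rfl
    | cons c t =>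
      simp only [List.length_cons] at hl
      by_cases hpre : p <+: c :: t
      · rw [pvR_cons_pos hpne hpre]
        have hfl : pvFindTok (c :: t) = some p.length := pvFindTok_eq_some hp hpre
        rw [pvScan_cons_some hfl]
        rw [pvScan_cons_none (pvFindTok_ws_head (by decide))]
        congr 1
        apply ih _ _ p hp
        simp [List.length_drop]; omega
      · rcases hf : pvFindTok (c :: t) with _ | k
        · -- no token matches at the head
          have hnopre : ∀ w ∈ pvTokens, ¬ w <+: c :: t := pvFindTok_none_iff.mp hf
          rw [pvR_cons_neg hpre]
          have hR : (c :: pvR p t) = pvR p (c :: t) := (pvR_cons_neg hpre).symm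
          have hnone2 : pvFindTok (c :: pvR p t) = none := by
            rw [hR, pvFindTok_none_iff]
            intro w hw
            exact pvR_head hpne (tok_ne_nil w hw) (tok_nows w hw) (hnopre w hw)
          rw [pvScan_cons_none hnone2, pvScan_cons_none hf]
          congr 1
          exact ih t (by omega) p hp
        · -- some token u ≠ p matches at the head
          obtain ⟨u, hu, hupre, hk⟩ := pvFindTok_some_spec hf
          obtain ⟨m, hm⟩ := hupre
          have hune : u ≠ [] := tok_ne_nil u hu
          have hu1 : 0 < u.length := List.length_pos_iff.mpr hune
          rw [← hm] at hpre ⊢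
          have hcopy : pvR p (u ++ m) = u ++ pvR p m := by
            apply pvR_copy p hpne
            intro i hi
            cases i with
            | zero => simpa using hpre
            | succ i' =>
              have hovl := tok_ovlp u hu p hp (i' + 1) hi (by omega)
              intro hc
              rcases prefix_split hc with hc1 | hc1
              · exact hovl.1 hc1
              · exact hovl.2 hc1
          rw [hcopy]
          cases u with
          | nil => exact absurd rfl hune
          | cons d u' =>
            have e1 : pvScan ((d :: u') ++ pvR p m) = ' ' :: pvScan (pvR p m) := by
              have hfl : pvFindTok ((d :: u') ++ pvR p m) = some (d :: u').length :=
                pvFindTok_eq_some hu (List.prefix_append _ _)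
              have := pvScan_cons_some (c := d) (t := u' ++ pvR p m)
                (k := (d :: u').length) (by simpa [List.cons_append] using hfl)
              simpa [List.cons_append, List.drop_left] using this
            have e2 : pvScan ((d :: u') ++ m) = ' ' :: pvScan m := by
              have hfr : pvFindTok ((d :: u') ++ m) = some (d :: u').length :=
                pvFindTok_eq_some hu (List.prefix_append _ _)
              have := pvScan_cons_some (c := d) (t := u' ++ m)
                (k := (d :: u').length) (by simpa [List.cons_append] using hfr)
              simpa [List.cons_append, List.drop_left] using this
            rw [e1, e2]
            congr 1
            apply ih m _ p hp
            have := congrArg List.length hm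
            simp [List.length_append] at this
            omega


-- ---- col lemmas ----
lemma pvCol_nil : pvCol [] = [] := by rw [pvCol]

lemma pvCol_cons_ws {c : Char} {t : List Char} (h : pvWS c = true) :
    pvCol (c :: t) = ' ' :: pvCol (t.dropWhile pvWS) := by
  rw [pvCol]; simp [h]

lemma pvCol_cons_ns {c : Char} {t : List Char} (h : pvWS c = false) :
    pvCol (c :: t) = c :: pvCol t := by
  rw [pvCol]; simp [h]

lemma pvCol_dw_congr {x y : List Char} (h : pvCol x = pvCol y) :
    pvCol (x.dropWhile pvWS) = pvCol (y.dropWhile pvWS) := by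
  cases x with
  | nil =>
    cases y with
    | nil => rfl
    | cons d ty =>
      exfalso
      by_cases hd : pvWS d
      · rw [pvCol_cons_ws hd, pvCol_nil] at h; exact (List.cons_ne_nil _ _) h.symm
      · rw [pvCol_cons_ns (by simpa using hd), pvCol_nil] at h; exact (List.cons_ne_nil _ _) h.symm
  | cons c tx =>
    cases y with
    | nil =>
      exfalso
      by_cases hc : pvWS c
      · rw [pvCol_cons_ws hc, pvCol_nil] at h; exact (List.cons_ne_nil _ _) h
      · rw [pvCol_cons_ns (by simpa using hc), pvCol_nil] at h; exact (List.cons_ne_nil _ _) h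
    | cons d ty =>
      by_cases hc : pvWS c <;> by_cases hd : pvWS d
      · rw [pvCol_cons_ws hc, pvCol_cons_ws hd] at h
        have h' : pvCol (tx.dropWhile pvWS) = pvCol (ty.dropWhile pvWS) := by
          injection h
        rw [List.dropWhile_cons_of_pos hc, List.dropWhile_cons_of_pos hd]
        exact h'
      · exfalso
        rw [pvCol_cons_ws hc, pvCol_cons_ns (by simpa using hd)] at h
        have : ' ' = d := by injection h
        rw [← this] at hd
        exact hd (by decide)
      · exfalso
        rw [pvCol_cons_ns (by simpa using hc), pvCol_cons_ws hd] at h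
        have : c = ' ' := by injection h
        rw [this] at hc
        exact hc (by decide)
      · rw [List.dropWhile_cons_of_neg hc, List.dropWhile_cons_of_neg hd]
        exact h

lemma pvCol_cons_congr (c : Char) {x y : List Char} (h : pvCol x = pvCol y) :
    pvCol (c :: x) = pvCol (c :: y) := by
  by_cases hc : pvWS c
  · rw [pvCol_cons_ws hc, pvCol_cons_ws hc, pvCol_dw_congr h]
  · rw [pvCol_cons_ns (by simpa using hc), pvCol_cons_ns (by simpa using hc), h]

-- ---- MAIN1: padded patterns commute with scan up to whitespace collapse ----
lemma colscan_R_pat :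
    ∀ (n : Nat) (l : List Char), l.length ≤ n →
      ∀ (a b : Char) (u : List Char), pvWS a = true → pvWS b = true → u ∈ pvTokens →
      pvCol (pvScan (pvR (a :: (u ++ [b])) l)) = pvCol (pvScan l) := by
  intro n
  induction n with
  | zero =>
    intro l hl a b u _ _ _
    have : l = [] := List.eq_nil_of_length_eq_zero (by omega)
    subst this; rfl
  | succ n ih =>
    intro l hl a b u ha hb hu
    set q : List Char := a :: (u ++ [b]) with hqdef
    have hqne : q ≠ [] := by simp [hqdef]
    have hqlen : q.length = u.length + 2 := by simp [hqdef]
    have hune : u ≠ [] := tok_ne_nil u hu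
    have hu1 : 0 < u.length := List.length_pos_iff.mpr hune
    by_cases hpre : q <+: l
    · obtain ⟨m, hm⟩ := hpre
      have hlen : l.length = u.length + 2 + m.length := by
        rw [← hm]; simp [List.length_append, hqlen]
      rw [← hm]
      have hq2 : q ++ m = a :: ((u ++ [b]) ++ m) := by simp [hqdef]
      have hqpre : q <+: a :: ((u ++ [b]) ++ m) := by rw [← hq2]; exact ⟨m, rfl⟩
      have hdropq : (a :: ((u ++ [b]) ++ m)).drop q.length = m := by
        rw [← hq2, List.drop_append]
        simp
      rw [hq2, pvR_cons_pos hqne hqpre, hdropq]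
      -- LHS scan
      rw [pvScan_cons_none (pvFindTok_ws_head (by decide))]
      -- RHS scan
      rw [pvScan_cons_none (pvFindTok_ws_head (by simpa [pvWS] using ha))]
      have hassoc : (u ++ [b]) ++ m = u ++ (b :: m) := by simp
      rw [hassoc]
      have e2 : pvScan (u ++ (b :: m)) = ' ' :: pvScan (b :: m) := by
        cases u with
        | nil => exact absurd rfl hune
        | cons d u' =>
          have hfr : pvFindTok ((d :: u') ++ (b :: m)) = some (d :: u').length :=
            pvFindTok_eq_some hu (List.prefix_append _ _)
          have := pvScan_cons_some (c := d) (t := u' ++ (b :: m))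
            (k := (d :: u').length) (by simpa [List.cons_append] using hfr)
          simpa [List.cons_append, List.drop_left] using this
      rw [e2, pvScan_cons_none (pvFindTok_ws_head (by simpa [pvWS] using hb))]
      -- collapse
      rw [pvCol_cons_ws (by decide), pvCol_cons_ws ha]
      congr 1
      rw [List.dropWhile_cons_of_pos (by decide), List.dropWhile_cons_of_pos hb]
      exact pvCol_dw_congr (ih m (by omega) a b u ha hb hu)
    · rcases hf : pvFindTok l with _ | k
      · cases l with
        | nil => rfl
        | cons c t =>
          have hnopre : ∀ w ∈ pvTokens, ¬ w <+: c :: t := pvFindTok_none_iff.mp hf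
          rw [pvR_cons_neg hpre]
          have hnone2 : pvFindTok (c :: pvR q t) = none := by
            rw [show c :: pvR q t = pvR q (c :: t) from (pvR_cons_neg hpre).symm,
              pvFindTok_none_iff]
            intro w hw
            exact pvR_head hqne (tok_ne_nil w hw) (tok_nows w hw) (hnopre w hw)
          rw [pvScan_cons_none hnone2, pvScan_cons_none hf]
          apply pvCol_cons_congr
          exact ih t (by simpa using Nat.le_of_succ_le_succ (by simpa using hl)) a b u ha hb hu
      · obtain ⟨u', hu', hupre, hk⟩ := pvFindTok_some_spec hf
        obtain ⟨m, hm⟩ := hupre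
        have hu'ne : u' ≠ [] := tok_ne_nil u' hu'
        have hu'1 : 0 < u'.length := List.length_pos_iff.mpr hu'ne
        rw [← hm] at hpre ⊢
        have hcopy : pvR q (u' ++ m) = u' ++ pvR q m := by
          apply pvR_copy q hqne
          intro i hi
          cases i with
          | zero => simpa using hpre
          | succ i' =>
            intro hc
            have hdne : u'.drop (i' + 1) ≠ [] := by
              simp [List.drop_eq_nil_iff]; omega
            cases hd : u'.drop (i' + 1) with
            | nil => exact hdne hd
            | cons e rest =>
              rw [hd] at hc
              obtain ⟨r, hr⟩ := hc
              have hae : a = e := by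
                rw [hqdef] at hr
                simp only [List.cons_append] at hr
                injection hr
              have hemem : e ∈ u' := List.mem_of_mem_drop (by rw [hd]; simp)
              have := tok_nows u' hu' e hemem
              rw [← hae] at this
              rw [show pvWS a = PySem.Chars.isspace a from rfl] at ha
              rw [ha] at this
              exact absurd this (by simp)
        rw [hcopy]
        cases u' with
        | nil => exact absurd rfl hu'ne
        | cons d w' =>
          have e1 : pvScan ((d :: w') ++ pvR q m) = ' ' :: pvScan (pvR q m) := by
            have hfl : pvFindTok ((d :: w') ++ pvR q m) = some (d :: w').length :=
              pvFindTok_eq_some hu' (List.prefix_append _ _)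
            have := pvScan_cons_some (c := d) (t := w' ++ pvR q m)
              (k := (d :: w').length) (by simpa [List.cons_append] using hfl)
            simpa [List.cons_append, List.drop_left] using this
          have e2 : pvScan ((d :: w') ++ m) = ' ' :: pvScan m := by
            have hfr : pvFindTok ((d :: w') ++ m) = some (d :: w').length :=
              pvFindTok_eq_some hu' (List.prefix_append _ _)
            have := pvScan_cons_some (c := d) (t := w' ++ m)
              (k := (d :: w').length) (by simpa [List.cons_append] using hfr)
            simpa [List.cons_append, List.drop_left] using this
          rw [e1, e2]
          apply pvCol_cons_congr
          apply ih m _ a b u ha hb hu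
          have := congrArg List.length hm
          simp [List.length_append] at this
          omega

-- ---- words lemmas ----
lemma pvWords_cons_ws {c : Char} {t : List Char} (h : pvWS c = true) :
    pvWords (c :: t) = pvWords t := by
  rw [pvWords]; simp [h]

lemma pvWords_cons_ns {c : Char} {t : List Char} (h : pvWS c = false) :
    pvWords (c :: t) = (c :: t.takeWhile pvNS) :: pvWords (t.dropWhile pvNS) := by
  rw [pvWords]; simp [h]

lemma pvWords_dropWhile_ws (t : List Char) :
    pvWords (t.dropWhile pvWS) = pvWords t := by
  induction t with
  | nil => rfl
  | cons c t ih =>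
    by_cases hc : pvWS c
    · rw [List.dropWhile_cons_of_pos hc, ih, pvWords_cons_ws hc]
    · rw [List.dropWhile_cons_of_neg hc]

lemma pvCol_ns_append {v r : List Char} (hv : ∀ c ∈ v, pvNS c = true) :
    pvCol (v ++ r) = v ++ pvCol r := by
  induction v with
  | nil => rfl
  | cons c vt ih =>
    have hc : pvWS c = false := by
      have := hv c (by simp)
      simp [pvNS] at this
      simp [pvWS, this]
    rw [List.cons_append, pvCol_cons_ns hc, ih (fun d hd => hv d (by simp [hd]))]
    simp

lemma takeWhile_append_all {p : Char → Bool} {v z : List Char} (h : ∀ d ∈ v, p d = true) :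
    (v ++ z).takeWhile p = v ++ z.takeWhile p := by
  induction v with
  | nil => rfl
  | cons c vt ih =>
    rw [List.cons_append, List.takeWhile_cons_of_pos (h c (by simp)),
      ih (fun d hd => h d (by simp [hd]))]
    rfl

lemma dropWhile_append_all {p : Char → Bool} {v z : List Char} (h : ∀ d ∈ v, p d = true) :
    (v ++ z).dropWhile p = z.dropWhile p := by
  induction v with
  | nil => rfl
  | cons c vt ih =>
    rw [List.cons_append, List.dropWhile_cons_of_pos (h c (by simp)),
      ih (fun d hd => h d (by simp [hd]))]

lemma pvWords_col : ∀ (n : Nat) (x : List Char), x.length ≤ n →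
    pvWords (pvCol x) = pvWords x := by
  intro n
  induction n with
  | zero =>
    intro x hx
    have : x = [] := List.eq_nil_of_length_eq_zero (by omega)
    subst this; rw [pvCol_nil]
  | succ n ih =>
    intro x hx
    cases x with
    | nil => rw [pvCol_nil]
    | cons c t =>
      simp only [List.length_cons] at hx
      by_cases hc : pvWS c
      · rw [pvCol_cons_ws hc, pvWords_cons_ws (by decide), pvWords_cons_ws hc]
        rw [ih _ (by have := List.length_dropWhile_le pvWS t; omega)]
        exact pvWords_dropWhile_ws t
      · have hcf : pvWS c = false := by simpa using hc
        rw [pvCol_cons_ns hcf, pvWords_cons_ns hcf, pvWords_cons_ns hcf]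
        set v := t.takeWhile pvNS with hv
        set r := t.dropWhile pvNS with hr
        have hvns : ∀ d ∈ v, pvNS d = true := fun d hd => List.mem_takeWhile_imp hd
        have htvr : t = v ++ r := (List.takeWhile_append_dropWhile).symm
        have hcolt : pvCol t = v ++ pvCol r := by
          rw [htvr] at ⊢
          exact pvCol_ns_append hvns
        have hrhead : pvCol r = [] ∨ ∃ z, pvCol r = ' ' :: z := by
          cases hrc : r with
          | nil => left; exact pvCol_nil
          | cons e z =>
            right
            have he : pvWS e = true := by
              have := List.head?_dropWhile_not pvNS t
              rw [← hr] at this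
              rw [hrc] at this
              simp [pvNS] at this
              simp [pvWS, this]
            rw [pvCol_cons_ws he]
            exact ⟨_, rfl⟩
        have hcoltake : (pvCol r).takeWhile pvNS = [] := by
          rcases hrhead with h0 | ⟨z, hz⟩
          · rw [h0]; rfl
          · rw [hz, List.takeWhile_cons_of_neg (by decide)]
        have hcoldrop : (pvCol r).dropWhile pvNS = pvCol r := by
          rcases hrhead with h0 | ⟨z, hz⟩
          · rw [h0]; rfl
          · rw [hz, List.dropWhile_cons_of_neg (by decide)]
        have htake : (pvCol t).takeWhile pvNS = v := by
          rw [hcolt, takeWhile_append_all hvns, hcoltake, List.append_nil]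
        have hdrop : (pvCol t).dropWhile pvNS = pvCol r := by
          rw [hcolt, dropWhile_append_all hvns, hcoldrop]
        rw [htake, hdrop]
        congr 1
        have hrlen : r.length ≤ n := by
          have h1 := List.length_dropWhile_le pvNS t
          rw [← hr] at h1
          omega
        exact ih r hrlen

lemma split₀_go_eq : ∀ (s gcur : List Char) (acc : List (List Char)),
    PySem.Chars.split₀.go s gcur acc = acc.reverse ++ pvWordsC gcur.reverse s := by
  intro s
  induction s with
  | nil =>
    intro gcur acc
    rw [PySem.Chars.split₀.go]
    by_cases hg : gcur = []
    · subst hg; simp [pvWordsC]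
    · have : gcur.isEmpty = false := by simpa [List.isEmpty_iff] using hg
      rw [this]
      have hgr : gcur.reverse ≠ [] := by simpa using hg
      simp only [pvWordsC, hgr, Bool.false_eq_true, if_false]
      simp
  | cons c rest ih =>
    intro gcur acc
    rw [PySem.Chars.split₀.go]
    by_cases hc : PySem.Chars.isspace c
    · rw [if_pos hc]
      by_cases hg : gcur = []
      · subst hg
        have : (List.nil (α := Char)).isEmpty = true := rfl
        rw [this, if_pos rfl]
        rw [ih]
        simp only [pvWordsC, List.reverse_nil]
        rw [show pvWS c = true from hc]
        simp
      · have hge : gcur.isEmpty = false := by simpa [List.isEmpty_iff] using hg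
        rw [hge]
        simp only [Bool.false_eq_true, if_false]
        rw [ih]
        have hgr : gcur.reverse ≠ [] := by simpa using hg
        simp only [pvWordsC, List.reverse_nil]
        rw [show pvWS c = true from hc]
        simp [hgr]
    · rw [if_neg hc, ih]
      simp only [pvWordsC, List.reverse_cons]
      rw [show pvWS c = (false : Bool) from by simpa [pvWS] using hc]
      simp

lemma pvWordsC_eq : ∀ (s : List Char),
    (pvWordsC [] s = pvWords s) ∧
    ∀ cur, cur ≠ [] →
      pvWordsC cur s = (cur ++ s.takeWhile pvNS) :: pvWords (s.dropWhile pvNS) := by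
  intro s
  induction s with
  | nil =>
    refine ⟨by simp [pvWordsC, pvWords], fun cur hcur => ?_⟩
    simp [pvWordsC, hcur, pvWords]
  | cons c rest ih =>
    constructor
    · by_cases hc : pvWS c
      · simp only [pvWordsC, hc, if_true]
        rw [ih.1, pvWords_cons_ws hc]
      · simp only [pvWordsC, hc, Bool.false_eq_true, if_false]
        rw [List.nil_append, ih.2 [c] (by simp), pvWords_cons_ns (by simpa using hc)]
        simp
    · intro cur hcur
      by_cases hc : pvWS c
      · simp only [pvWordsC, hc, if_true]
        rw [if_neg hcur, ih.1]
        have hcns : pvNS c = false := by simp [pvNS, pvWS] at hc ⊢; exact hc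
        rw [List.takeWhile_cons_of_neg (by simp [hcns]), List.dropWhile_cons_of_neg (by simp [hcns])]
        rw [List.append_nil, pvWords_cons_ws hc]
      · simp only [pvWordsC, hc, Bool.false_eq_true, if_false]
        rw [ih.2 (cur ++ [c]) (by simp)]
        have hcns : pvNS c = true := by simp [pvNS, pvWS] at hc ⊢; exact hc
        rw [List.takeWhile_cons_of_pos hcns, List.dropWhile_cons_of_pos hcns]
        simp

lemma split₀_eq_words (s : List Char) : PySem.Chars.split₀ s = pvWords s := by
  rw [PySem.Chars.split₀, split₀_go_eq]
  simp only [List.reverse_nil]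
  exact (pvWordsC_eq s).1

lemma pvWords_prop : ∀ (n : Nat) (s : List Char), s.length ≤ n →
    ∀ w ∈ pvWords s, w ≠ [] ∧ ∀ c ∈ w, PySem.Chars.isspace c = false := by
  intro n
  induction n with
  | zero =>
    intro s hs
    have : s = [] := List.eq_nil_of_length_eq_zero (by omega)
    subst this
    intro w hw
    simp [pvWords] at hw
  | succ n ih =>
    intro s hs
    cases s with
    | nil => intro w hw; simp [pvWords] at hw
    | cons c t =>
      simp only [List.length_cons] at hs
      by_cases hc : pvWS c
      · rw [pvWords_cons_ws hc]
        exact ih t (by omega)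
      · rw [pvWords_cons_ns (by simpa using hc)]
        intro w hw
        rcases List.mem_cons.mp hw with rfl | hw'
        · refine ⟨by simp, fun d hd => ?_⟩
          rcases List.mem_cons.mp hd with rfl | hd'
          · simpa [pvWS] using hc
          · have := List.mem_takeWhile_imp hd'
            simpa [pvNS] using this
        · have hlen : (t.dropWhile pvNS).length ≤ n := by
            have := List.length_dropWhile_le pvNS t
            omega
          exact ih _ hlen w hw'

-- ---- strip of joined words is a no-op ----
lemma join_head_ex : ∀ (W : List (List Char)), W ≠ [] →
    (∀ w ∈ W, w ≠ [] ∧ ∀ c ∈ w, PySem.Chars.isspace c = false) →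
    ∃ c z, List.intercalate [' '] W = c :: z ∧ PySem.Chars.isspace c = false := by
  intro W hW hgood
  cases W with
  | nil => exact absurd rfl hW
  | cons w W' =>
    obtain ⟨hwne, hwns⟩ := hgood w (by simp)
    cases w with
    | nil => exact absurd rfl hwne
    | cons c w' =>
      refine ⟨c, ?_, ?_, hwns c (by simp)⟩
      · exact w' ++ (match W' with
          | [] => []
          | _ => [' '] ++ List.intercalate [' '] W')
      · cases W' with
        | nil => simp [List.intercalate]
        | cons w₂ W'' =>
          rw [show List.intercalate [' '] ((c :: w') :: w₂ :: W'') =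
            (c :: w') ++ [' '] ++ List.intercalate [' '] (w₂ :: W'') from by
              simp [List.intercalate, List.intersperse]]
          simp

lemma join_rev_head : ∀ (W : List (List Char)), W ≠ [] →
    (∀ w ∈ W, w ≠ [] ∧ ∀ c ∈ w, PySem.Chars.isspace c = false) →
    ∃ c z, (List.intercalate [' '] W).reverse = c :: z ∧ PySem.Chars.isspace c = false := by
  intro W
  induction W with
  | nil => intro h; exact absurd rfl h
  | cons w W' ih =>
    intro _ hgood
    obtain ⟨hwne, hwns⟩ := hgood w (by simp)
    cases W' with
    | nil =>
      cases hwr : w.reverse with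
      | nil => exact absurd (by simpa using hwr) hwne
      | cons c z =>
        refine ⟨c, z, ?_, ?_⟩
        · rw [show List.intercalate [' '] [w] = w from by simp [List.intercalate]]
          exact hwr
        · have : c ∈ w := by
            rw [← List.mem_reverse, hwr]; simp
          exact hwns c this
    | cons w₂ W'' =>
      obtain ⟨c, z, hcz, hns⟩ := ih (by simp) (fun v hv => hgood v (by simp [hv]))
      refine ⟨c, z ++ [' '] ++ w.reverse, ?_, hns⟩
      rw [show List.intercalate [' '] (w :: w₂ :: W'') =
        w ++ [' '] ++ List.intercalate [' '] (w₂ :: W'') from by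
          simp [List.intercalate, List.intersperse]]
      simp only [List.reverse_append, hcz]
      simp

lemma strip_join (s : List Char) :
    PySem.Chars.strip (PySem.Chars.join [' '] (pvWords s)) =
      PySem.Chars.join [' '] (pvWords s) := by
  have hgood := pvWords_prop s.length s (le_refl _)
  rw [PySem.Chars.join]
  cases hW : pvWords s with
  | nil =>
    rw [show List.intercalate [' '] ([] : List (List Char)) = [] from by simp [List.intercalate]]
    rfl
  | cons w W' =>
    rw [hW] at hgood
    have hWne : (w :: W') ≠ [] := by simp
    obtain ⟨c, z, hcz, hns⟩ := join_head_ex (w :: W') hWne hgood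
    obtain ⟨c2, z2, hcz2, hns2⟩ := join_rev_head (w :: W') hWne hgood
    rw [PySem.Chars.strip, PySem.Chars.lstrip, PySem.Chars.rstrip]
    rw [hcz, List.dropWhile_cons_of_neg (by simp [hns])]
    rw [← hcz]
    rw [hcz2, List.dropWhile_cons_of_neg (by simp [hns2])]
    rw [← hcz2, List.reverse_reverse]

-- ---- chaining over the pattern lists ----
lemma fold_replace_eq_fold_R (L : List (List Char)) (hL : ∀ p ∈ L, p ≠ []) :
    ∀ s : List Char,
      L.foldl (fun cs p => PySem.Chars.replace cs p [' ']) s =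
      L.foldl (fun cs p => pvR p cs) s := by
  induction L with
  | nil => intro s; rfl
  | cons p L ih =>
    intro s
    simp only [List.foldl_cons]
    rw [pvReplace_eq p s (hL p (by simp))]
    exact ih (fun q hq => hL q (by simp [hq])) (pvR p s)

def pvPats16' : List (Char × List Char × Char) :=
  [(' ', pvTokens[0], ' '), (' ', pvTokens[1], ' '), (' ', pvTokens[2], ' '), (' ', pvTokens[3], ' '),
   (' ', pvTokens[4], ' '), (' ', pvTokens[5], ' '), (' ', pvTokens[6], ' '), (' ', pvTokens[7], ' '),
   ('\n', pvTokens[0], '\n'), ('\n', pvTokens[1], '\n'), ('\n', pvTokens[2], '\n'), ('\n', pvTokens[3], '\n'),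
   ('\n', pvTokens[0], ' '), (' ', pvTokens[0], '\n'), ('\n', pvTokens[2], ' '), (' ', pvTokens[2], '\n')]

set_option maxRecDepth 100000 in
lemma pats16_map : pvPats16.map String.toList = pvPats16'.map (fun q => q.1 :: (q.2.1 ++ [q.2.2])) := by decide

set_option maxRecDepth 100000 in
lemma pats8_map : pvPats8.map String.toList = pvTokens := by decide

lemma chain16 : ∀ (L : List (Char × List Char × Char)),
    (∀ q ∈ L, pvWS q.1 = true ∧ pvWS q.2.2 = true ∧ q.2.1 ∈ pvTokens) →
    ∀ s : List Char,
      pvCol (pvScan ((L.map (fun q => q.1 :: (q.2.1 ++ [q.2.2]))).foldl (fun cs p => pvR p cs) s)) =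
      pvCol (pvScan s) := by
  intro L
  induction L with
  | nil => intro _ s; rfl
  | cons q L ih =>
    intro hL s
    obtain ⟨ha, hb, hu⟩ := hL q (by simp)
    simp only [List.map_cons, List.foldl_cons]
    rw [ih (fun r hr => hL r (by simp [hr])) (pvR (q.1 :: (q.2.1 ++ [q.2.2])) s)]
    exact colscan_R_pat s.length s (le_refl _) q.1 q.2.2 q.2.1 ha hb hu

lemma chain8 : ∀ (L : List (List Char)), (∀ p ∈ L, p ∈ pvTokens) → ∀ s : List Char,
    pvScan (L.foldl (fun cs p => pvR p cs) s) = pvScan s := by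
  intro L
  induction L with
  | nil => intro _ s; rfl
  | cons p L ih =>
    intro hL s
    simp only [List.foldl_cons]
    rw [ih (fun r hr => hL r (by simp [hr])) (pvR p s)]
    exact scan_R_tok s.length s (le_refl _) p (hL p (by simp))

lemma fold_notIn : ∀ (L : List (List Char)) (s w : List Char),
    (∀ p ∈ L, p ∈ pvTokens) → w ∈ pvTokens → (pvNotIn w s ∨ w ∈ L) →
    pvNotIn w (L.foldl (fun cs p => pvR p cs) s) := by
  intro L
  induction L with
  | nil =>
    intro s w _ _ hyp
    rcases hyp with h | h
    · exact h
    · simp at h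
  | cons p L ih =>
    intro s w hL hw hyp
    simp only [List.foldl_cons]
    have hpne : p ≠ [] := tok_ne_nil p (hL p (by simp))
    have hwne : w ≠ [] := tok_ne_nil w hw
    have hwns := tok_nows w hw
    by_cases hwp : w = p
    · apply ih (pvR p s) w (fun r hr => hL r (by simp [hr])) hw
      left
      exact pvR_notIn hpne hwne hwns s.length s (le_refl _) (Or.inl hwp)
    · rcases hyp with hni | hmem
      · apply ih (pvR p s) w (fun r hr => hL r (by simp [hr])) hw
        left
        exact pvR_notIn hpne hwne hwns s.length s (le_refl _) (Or.inr hni)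
      · rcases List.mem_cons.mp hmem with h | h
        · exact absurd h hwp
        · exact ih (pvR p s) w (fun r hr => hL r (by simp [hr])) hw (Or.inr h)

-- ---- string-level bridging ----
lemma toList_fold_replace (L : List String) :
    ∀ s : String,
      (L.foldl (fun s p => PySem.Str.replace s p " ") s).toList =
      (L.map String.toList).foldl (fun cs p => PySem.Chars.replace cs p [' ']) s.toList := by
  induction L with
  | nil => intro s; rfl
  | cons p L ih =>
    intro s
    simp only [List.foldl_cons, List.map_cons]
    rw [ih (PySem.Str.replace s p " ")]
    congr 1
    rw [show (PySem.Str.replace s p " ").toList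
        = PySem.Chars.replace s.toList p.toList " ".toList from by simp [PySem.Str.replace]]
    rfl

lemma pats16'_facts : ∀ q ∈ pvPats16', pvWS q.1 = true ∧ pvWS q.2.2 = true ∧ q.2.1 ∈ pvTokens := by
  decide

lemma pats8_sub : ∀ p ∈ pvPats8.map String.toList, p ∈ pvTokens := by
  rw [pats8_map]; exact fun p h => h

lemma key_chars (chars : List Char) :
    PySem.Chars.strip (PySem.Chars.join [' '] (PySem.Chars.split₀
      ((pvPats8.map String.toList).foldl (fun cs p => PySem.Chars.replace cs p [' '])
        ((pvPats16.map String.toList).foldl (fun cs p => PySem.Chars.replace cs p [' ']) chars)))) =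
    PySem.Chars.join [' '] (PySem.Chars.split₀ (pvScanGo chars.length chars)) := by
  have h16ne : ∀ p ∈ pvPats16.map String.toList, p ≠ [] := by
    rw [pats16_map]
    intro p hp
    obtain ⟨q, _, rfl⟩ := List.mem_map.mp hp
    simp
  have h8ne : ∀ p ∈ pvPats8.map String.toList, p ≠ [] := by
    rw [pats8_map]; exact tok_ne_nil
  rw [fold_replace_eq_fold_R _ h16ne, fold_replace_eq_fold_R _ h8ne]
  set Y := (pvPats16.map String.toList).foldl (fun cs p => pvR p cs) chars with hY
  set X := (pvPats8.map String.toList).foldl (fun cs p => pvR p cs) Y with hX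
  have hfree : ∀ w ∈ pvTokens, pvNotIn w X := by
    intro w hw
    apply fold_notIn _ Y w pats8_sub hw
    right
    rw [pats8_map]
    exact hw
  have hscanX : pvScan X = X := pvScan_tokFree X.length X (le_refl _) hfree
  have h2 : pvScan X = pvScan Y := chain8 _ pats8_sub Y
  have h3 : pvCol (pvScan Y) = pvCol (pvScan chars) := by
    rw [hY, pats16_map]
    exact chain16 pvPats16' pats16'_facts chars
  have hwordsX : pvWords X = pvWords (pvScan chars) :=
    calc pvWords X = pvWords (pvScan X) := by rw [hscanX]
    _ = pvWords (pvScan Y) := by rw [h2]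
    _ = pvWords (pvCol (pvScan Y)) := (pvWords_col (pvScan Y).length _ (le_refl _)).symm
    _ = pvWords (pvCol (pvScan chars)) := by rw [h3]
    _ = pvWords (pvScan chars) := pvWords_col (pvScan chars).length _ (le_refl _)
  rw [split₀_eq_words, split₀_eq_words]
  rw [show pvScanGo chars.length chars = pvScan chars from rfl]
  rw [hwordsX]
  exact strip_join (pvScan chars)

-- ===== VERDICT (by name: the statement is the Claim_ definition above) =====
set_option maxHeartbeats 400000 in
theorem clean_eos_tokens_spec : Claim_equal_clean_eos_tokens := by
  intro text _hd
  show clean_eos_tokens text = clean_eos_tokens_alt text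
  by_cases htext : text = ""
  · rw [clean_eos_tokens, clean_eos_tokens_alt, if_pos htext, if_pos htext]
  · rw [clean_eos_tokens, clean_eos_tokens_alt, if_neg htext, if_neg htext]
    rw [PySem.Str.strip, PySem.Str.join, PySem.Str.join, PySem.Str.split₀, PySem.Str.split₀]
    apply congrArg
    simp only [List.map_map]
    rw [show (" " : String).toList = [' '] from rfl]
    rw [show (String.toList ∘ String.ofList) = id from by funext l; simp]
    simp only [List.map_id]
    have hc2 : (pvPats8.foldl (fun s p => PySem.Str.replace s p " ")
          (pvPats16.foldl (fun s p => PySem.Str.replace s p " ") text)).toList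
        = (pvPats8.map String.toList).foldl (fun cs p => PySem.Chars.replace cs p [' '])
          ((pvPats16.map String.toList).foldl (fun cs p => PySem.Chars.replace cs p [' ']) text.toList) := by
      rw [toList_fold_replace, toList_fold_replace]
    rw [hc2]
    simp only [String.toList_ofList]
    exact key_chars text.toList
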